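-- pv_equiv track=rewrite | github.com/BasHdezDev/EjercicioValidadorClave | validadorclave/modelo/validador.py | contiene_calisto
-- ===== SOURCE A (Python) =====
-- def contiene_calisto(clave: str) -> bool:
--
--     palabra = "calisto"
--     clave_lower = clave.lower()
--     index = 0
--
--     while index < len(clave):
--         index = clave_lower.find(palabra, index)
--         if index > -1:
--             inicio_palabra = index
--             final_palabra = index + len(palabra)
--             calisto_str = clave[inicio_palabra:final_palabra]
--             count = 0
--             for letra in calisto_str:
--                 if letra.isupper():
--                     count +=1
--
--             if 2 <= count < len(palabra):
--                 return True
--             else: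
--                 index += len(palabra)
--         else:
--             return False
--     return False
-- ===== SOURCE B (Python) =====
-- def contiene_calisto(clave: str) -> bool:
--     return any(
--         clave[i:i + 7].lower() == "calisto"
--         and 2 <= sum(1 for c in clave[i:i + 7] if c.isupper()) < 7
--         for i in range(len(clave) - 6)
--     )
-- ===== Notes on version B (the rewrite author's own statement) =====
-- stated objective: simpler
-- what changed: Replaced A's stateful while-loop that jumps between str.find results by a one-line sliding-window scan testing every start position i with a lowered 7-char window compared to the target word (correct because the target word has pairwise-distinct letters, so occurrences never overlap and A's advance-by-7 visits them all).
import Mathlib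
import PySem

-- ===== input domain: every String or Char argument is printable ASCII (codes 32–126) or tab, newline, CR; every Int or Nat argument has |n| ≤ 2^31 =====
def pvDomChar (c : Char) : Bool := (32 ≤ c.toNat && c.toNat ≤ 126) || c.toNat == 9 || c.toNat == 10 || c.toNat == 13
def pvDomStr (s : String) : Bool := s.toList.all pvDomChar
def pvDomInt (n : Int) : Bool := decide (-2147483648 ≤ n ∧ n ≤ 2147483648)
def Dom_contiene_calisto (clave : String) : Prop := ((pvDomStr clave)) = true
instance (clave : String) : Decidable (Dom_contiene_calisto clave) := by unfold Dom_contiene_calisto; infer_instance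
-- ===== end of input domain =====

-- B replaces A's find-and-jump while-loop by a single sliding-window any-scan over all start
-- positions (objective: simpler); the return values are proved identical on all inputs.

-- ===== PORT A =====
-- termination helper for A's while-loop: a found index is ≥ the start it was searched from
theorem pv_findFrom_ge (L w : List Char) (k : Nat)
    (h : PySem.Chars.findFrom L w (k : Int) none > -1) :
    (k : Int) ≤ PySem.Chars.findFrom L w (k : Int) none := by
  by_cases hk : k ≤ L.length
  · rw [PySem.Chars.findFrom_natCast L w k hk] at h ⊢
    split at h
    · omega
    · rename_i hne
      have := PySem.Chars.neg_one_le_find (List.drop k L) w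
      split <;> omega
  · exfalso
    simp only [PySem.Chars.findFrom] at h
    split at h <;> [omega; skip]
    rename_i hlt
    simp at hlt
    split at h <;> omega

-- A's for-loop counting uppercase letters in the matched window
def pvCountA (cs : List Char) : Int :=
  cs.foldl (fun c ch => if PySem.Chars.isupper ch then c + 1 else c) 0

-- A's while-loop; `index` is A's Python int, which is always a Nat here (0 at entry,
-- a found index + 7 thereafter), carried as Nat for termination
def pvLoopA (s L : List Char) (index : Nat) : Bool :=
  if hi : index < s.length then
    let j := PySem.Chars.findFrom L "calisto".toList (index : Int) none
    if hj : j > -1 then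
      let calisto_str := PySem.List.slice s (some j) (some (j + 7))
      let count := pvCountA calisto_str
      if 2 ≤ count ∧ count < 7 then true
      else pvLoopA s L (j.toNat + 7)
    else false
  else false
termination_by s.length - index
decreasing_by
  have := pv_findFrom_ge L "calisto".toList index hj
  omega

def contiene_calisto (clave : String) : Bool :=
  pvLoopA clave.toList (PySem.Chars.lower clave.toList) 0

-- ===== PORT B =====
-- sum(1 for c in w if c.isupper())
def pvCountB (cs : List Char) : Int :=
  ((cs.filter (fun c => PySem.Chars.isupper c)).map (fun _ => (1 : Int))).sum

def contiene_calisto_alt (clave : String) : Bool :=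
  let s := clave.toList
  (PySem.List.pyRange 0 ((s.length : Int) - 6) 1).any (fun i =>
    let w := PySem.List.slice s (some i) (some (i + 7))
    PySem.Chars.lower w == "calisto".toList &&
    decide (2 ≤ pvCountB w ∧ pvCountB w < 7))

-- ===== PRECONDITION & SPEC =====
def Spec_contiene_calisto (clave : String) (out : Bool) : Prop := out = contiene_calisto_alt clave
instance (clave : String) (out : Bool) : Decidable (Spec_contiene_calisto clave out) := by unfold Spec_contiene_calisto; infer_instance

-- ===== CLAIM (what is proved, stated in full; the proofs are below) =====
def Claim_equal_contiene_calisto : Prop := ∀ (clave : String), Dom_contiene_calisto clave → Spec_contiene_calisto clave (contiene_calisto clave)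

-- ===== LEMMAS AND PROOFS =====

-- occurrence of the lowered word "calisto" at position i
def pvOcc (s : List Char) (i : Nat) : Prop :=
  "calisto".toList <+: (PySem.Chars.lower s).drop i

-- the uppercase-count test on the length-7 window of the original string starting at i
def pvPass (s : List Char) (i : Nat) : Prop :=
  2 ≤ pvCountA ((s.drop i).take 7) ∧ pvCountA ((s.drop i).take 7) < 7

theorem pvCountB_eq (cs : List Char) : pvCountB cs = pvCountA cs := by
  unfold pvCountB pvCountA
  rw [PySem.List.foldl_count_if, List.countP_eq_length_filter]
  simp [List.map_const', List.sum_replicate]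

theorem pvOcc_le (s : List Char) (i : Nat) (h : pvOcc s i) : i + 7 ≤ s.length := by
  have hl := h.length_le
  have h7 : ("calisto".toList).length = 7 := by decide
  simp only [List.length_drop, PySem.Chars.lower, List.length_map, h7] at hl
  omega

-- "calisto" has pairwise-distinct letters, so two occurrences cannot overlap
theorem pvOcc_no_overlap (s : List Char) (i j : Nat) (hi : pvOcc s i) (hj : pvOcc s j)
    (hij : i < j) : i + 7 ≤ j := by
  by_contra hc
  have hw : "calisto".toList = ['c','a','l','i','s','t','o'] := by decide
  unfold pvOcc at hi hj
  rw [hw] at hi hj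
  have hjl := hj.length_le
  simp only [List.length_drop, List.length_cons, List.length_nil] at hjl
  have hd : j - i < (['c','a','l','i','s','t','o'] : List Char).length := by simp; omega
  have e1 := hi.getElem hd
  have e0 := hj.getElem (by simp : 0 < (['c','a','l','i','s','t','o'] : List Char).length)
  rw [List.getElem_drop] at e1 e0
  simp only [Nat.add_zero] at e0
  have hji : i + (j - i) = j := by omega
  simp_rw [hji] at e1
  have e2 := e1.trans e0.symm
  have h1 : 1 ≤ j - i := by omega
  have h2 : j - i ≤ 6 := by omega
  interval_cases h : (j - i) <;>
    simp only [List.getElem_cons_zero, List.getElem_cons_succ] at e2 <;> exact absurd e2 (by decide)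

theorem pv_slice7 (s : List Char) (j : Int) (hj : 0 ≤ j) :
    PySem.List.slice s (some j) (some (j + 7)) = (s.drop j.toNat).take 7 := by
  rw [PySem.List.slice_toNat s hj (by omega)]
  congr 1
  omega

-- A's loop from position k finds a passing occurrence at or after k
theorem pvLoopA_iff (s : List Char) (k : Nat) :
    pvLoopA s (PySem.Chars.lower s) k = true ↔ ∃ i, k ≤ i ∧ pvOcc s i ∧ pvPass s i := by
  have main : ∀ m k, s.length - k ≤ m →
      (pvLoopA s (PySem.Chars.lower s) k = true ↔ ∃ i, k ≤ i ∧ pvOcc s i ∧ pvPass s i) := by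
    intro m
    induction m with
    | zero =>
      intro k hk
      rw [pvLoopA, dif_neg (by omega)]
      simp only [Bool.false_eq_true, false_iff]
      rintro ⟨i, hki, hocc, -⟩
      have := pvOcc_le s i hocc
      omega
    | succ m ih =>
      intro k hk
      by_cases hik : k < s.length
      · rw [pvLoopA, dif_pos hik]
        simp only
        by_cases hj : PySem.Chars.findFrom (PySem.Chars.lower s) "calisto".toList (k : Int) none > -1
        · rw [dif_pos hj]
          set j := PySem.Chars.findFrom (PySem.Chars.lower s) "calisto".toList (k : Int) none with hjdef
          have hLlen : (PySem.Chars.lower s).length = s.length := by simp [PySem.Chars.lower]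
          have hj0 : 0 ≤ j := by omega
          have hspec := PySem.Chars.findFrom_natCast_spec (PySem.Chars.lower s) "calisto".toList k
            (by omega) (by omega)
          rw [← hjdef] at hspec
          obtain ⟨hkj, hpre, hmin⟩ := hspec
          have hoccj : pvOcc s j.toNat := hpre
          have hkj' : k ≤ j.toNat := by omega
          rw [pv_slice7 s j hj0]
          by_cases hpass : 2 ≤ pvCountA ((s.drop j.toNat).take 7) ∧ pvCountA ((s.drop j.toNat).take 7) < 7
          · rw [if_pos hpass]
            simp only [true_iff]
            exact ⟨j.toNat, hkj', hoccj, hpass⟩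
          · rw [if_neg hpass]
            rw [ih (j.toNat + 7) (by omega)]
            constructor
            · rintro ⟨i, hi7, hocc, hp⟩
              exact ⟨i, by omega, hocc, hp⟩
            · rintro ⟨i, hki, hocc, hp⟩
              refine ⟨i, ?_, hocc, hp⟩
              rcases Nat.lt_or_ge i (j.toNat + 7) with hlt | hge
              · rcases Nat.lt_or_ge i j.toNat with hlt2 | hge2
                · exact absurd hocc (hmin i hki hlt2)
                · rcases Nat.eq_or_lt_of_le hge2 with heq | hlt3
                  · exact absurd hp (by rw [heq] at hpass; exact hpass)
                  · have := pvOcc_no_overlap s j.toNat i hoccj hocc hlt3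
                    omega
              · exact hge
        · rw [dif_neg hj]
          have hLlen : (PySem.Chars.lower s).length = s.length := by simp [PySem.Chars.lower]
          rw [PySem.Chars.findFrom_natCast (PySem.Chars.lower s) "calisto".toList k (by omega)] at hj
          have hfind : PySem.Chars.find ((PySem.Chars.lower s).drop k) "calisto".toList = -1 := by
            by_contra hne
            have hge := PySem.Chars.neg_one_le_find ((PySem.Chars.lower s).drop k) "calisto".toList
            rw [if_neg hne] at hj
            omega
          have hnone := (PySem.Chars.find_eq_neg_one_iff ((PySem.Chars.lower s).drop k)
            "calisto".toList).mp hfind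
          simp only [Bool.false_eq_true, false_iff]
          rintro ⟨i, hki, hocc, -⟩
          have h1 : List.drop i (PySem.Chars.lower s)
              = List.drop (i - k) (List.drop k (PySem.Chars.lower s)) := by
            rw [List.drop_drop]; congr 1; omega
          refine hnone (List.IsInfix.trans (List.IsPrefix.isInfix hocc) ?_)
          rw [h1]
          exact (List.drop_suffix (i - k) (List.drop k (PySem.Chars.lower s))).isInfix
      · rw [pvLoopA, dif_neg (by omega)]
        simp only [Bool.false_eq_true, false_iff]
        rintro ⟨i, hki, hocc, -⟩
        have := pvOcc_le s i hocc
        omega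
  exact main (s.length - k) k le_rfl

-- B's window test at i is exactly "occurrence at i and the count passes"
theorem pv_window_eq (s : List Char) (i : Nat) :
    (PySem.Chars.lower ((s.drop i).take 7) == "calisto".toList &&
      decide (2 ≤ pvCountB ((s.drop i).take 7) ∧ pvCountB ((s.drop i).take 7) < 7)) = true
    ↔ pvOcc s i ∧ pvPass s i := by
  rw [Bool.and_eq_true, beq_iff_eq, decide_eq_true_iff]
  have h7 : ("calisto".toList).length = 7 := by decide
  unfold pvOcc pvPass
  rw [pvCountB_eq]
  have hmt : PySem.Chars.lower ((s.drop i).take 7)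
      = ((PySem.Chars.lower s).drop i).take 7 := by
    simp [PySem.Chars.lower, List.map_take, List.map_drop]
  rw [hmt]
  constructor
  · rintro ⟨heq, hc⟩
    exact ⟨(List.prefix_iff_eq_take.mpr (by rw [h7, heq.symm])), hc⟩
  · rintro ⟨hpre, hc⟩
    refine ⟨?_, hc⟩
    have := List.prefix_iff_eq_take.mp hpre
    rw [h7] at this
    exact this.symm

theorem pvAlt_iff (clave : String) :
    contiene_calisto_alt clave = true ↔ ∃ i, pvOcc clave.toList i ∧ pvPass clave.toList i := by
  unfold contiene_calisto_alt
  simp only [List.any_eq_true]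
  constructor
  · rintro ⟨x, hx, hpred⟩
    rw [PySem.List.mem_pyRange_one] at hx
    rw [pv_slice7 clave.toList x hx.1] at hpred
    exact ⟨x.toNat, (pv_window_eq clave.toList x.toNat).mp hpred⟩
  · rintro ⟨i, hocc, hpass⟩
    refine ⟨(i : Int), ?_, ?_⟩
    · rw [PySem.List.mem_pyRange_one]
      have := pvOcc_le clave.toList i hocc
      omega
    · rw [pv_slice7 clave.toList (i : Int) (by omega)]
      rw [Int.toNat_natCast]
      exact (pv_window_eq clave.toList i).mpr ⟨hocc, hpass⟩

-- ===== VERDICT (by name: the statement is the Claim_ definition above) =====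
theorem contiene_calisto_spec : Claim_equal_contiene_calisto := by
  intro clave _
  unfold Spec_contiene_calisto contiene_calisto
  have hA := pvLoopA_iff clave.toList 0
  have hB := pvAlt_iff clave
  by_cases h : ∃ i, pvOcc clave.toList i ∧ pvPass clave.toList i
  · obtain ⟨i, hocc, hpass⟩ := h
    rw [hA.mpr ⟨i, Nat.zero_le i, hocc, hpass⟩, hB.mpr ⟨i, hocc, hpass⟩]
  · have e1 : pvLoopA clave.toList (PySem.Chars.lower clave.toList) 0 = false := by
      cases hv : pvLoopA clave.toList (PySem.Chars.lower clave.toList) 0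
      · rfl
      · obtain ⟨i, -, hocc, hpass⟩ := hA.mp hv
        exact absurd ⟨i, hocc, hpass⟩ h
    have e2 : contiene_calisto_alt clave = false := by
      cases hv : contiene_calisto_alt clave
      · rfl
      · obtain ⟨i, hocc, hpass⟩ := hB.mp hv
        exact absurd ⟨i, hocc, hpass⟩ h
    rw [e1, e2]
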